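-- pv_equiv track=rewrite | github.com/DavidDema/DeepRL-quadruped-robot | RL_Project/plot_test2.py | split_traverse
-- ===== SOURCE A (Python) =====
-- def split_traverse(traverse, side, terminate):
--     travs = []
--     sides = []
--
--     t = []
--     s = []
--     for i, term in enumerate(terminate):
--         t.append(traverse[i])
--         s.append(side[i])
--
--         if term or i==len(terminate)-1:
--             travs.append(t)
--             sides.append(s)
--             t = []
--             s = []
--     return travs, sides
-- ===== SOURCE B (Python) =====
-- def split_traverse(traverse, side, terminate):
--     n = len(terminate)
--     pairs = [(traverse[i], side[i]) for i in range(n)]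
--     travs, sides = [], []
--     start = 0
--     while start < n:
--         try:
--             j = terminate.index(True, start)
--         except ValueError:
--             j = n - 1
--         seg = pairs[start:j + 1]
--         travs.append([x for x, _ in seg])
--         sides.append([y for _, y in seg])
--         start = j + 1
--     return travs, sides
-- ===== Notes on version B (the rewrite author's own statement) =====
-- stated objective: alternative
-- what changed: A builds both segment lists in one interleaved accumulating scan with pending buffers; B precomputes a paired (traverse[i], side[i]) table, then repeatedly finds the next terminator index (or falls back to the last index), slices the table between boundaries, and unzips each slice.
import Mathlib
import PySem

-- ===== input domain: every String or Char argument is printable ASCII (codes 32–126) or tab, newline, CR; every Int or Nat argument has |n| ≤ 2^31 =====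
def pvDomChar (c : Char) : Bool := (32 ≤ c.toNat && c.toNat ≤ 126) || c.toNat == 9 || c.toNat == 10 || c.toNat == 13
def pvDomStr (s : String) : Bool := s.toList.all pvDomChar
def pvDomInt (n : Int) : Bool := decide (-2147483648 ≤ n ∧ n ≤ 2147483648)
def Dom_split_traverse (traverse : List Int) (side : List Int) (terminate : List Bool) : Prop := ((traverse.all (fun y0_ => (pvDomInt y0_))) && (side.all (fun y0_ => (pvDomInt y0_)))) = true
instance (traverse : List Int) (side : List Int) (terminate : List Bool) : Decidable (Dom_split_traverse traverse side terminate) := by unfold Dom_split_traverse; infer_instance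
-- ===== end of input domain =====

-- B replaces A's single accumulating scan by a find-next-terminator-and-slice loop over a
-- precomputed paired table (same cost, different decomposition; objective: alternative).

-- ===== PORT A =====
def split_traverse (traverse : List Int) (side : List Int) (terminate : List Bool) : List (List Int) × List (List Int) :=
  let n : Int := terminate.length
  let st := (PySem.List.enumerate terminate).foldl
    (fun (st : List (List Int) × List (List Int) × List Int × List Int) (p : Int × Bool) =>
      let t := st.2.2.1 ++ [PySem.List.pyGetD traverse p.1 0]
      let s := st.2.2.2 ++ [PySem.List.pyGetD side p.1 0]
      if p.2 || decide (p.1 = n - 1) then (st.1 ++ [t], st.2.1 ++ [s], ([] : List Int), ([] : List Int))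
      else (st.1, st.2.1, t, s))
    ([], [], [], [])
  (st.1, st.2.1)

-- ===== PORT B =====
-- helper of Source B's while loop; Python's terminate.index(True, start) is ported by hand as
-- start + index? of the dropped suffix (exact: Python scans from `start`)
def pvLoop (pairs : List (Int × Int)) (terminate : List Bool) (n : Nat) (start : Nat)
    (travs sides : List (List Int)) : List (List Int) × List (List Int) :=
  if h : start < n then
    let j : Nat := ((PySem.List.index? (terminate.drop start) true).map (start + ·)).getD (n - 1)
    let seg := PySem.List.slice pairs (some (start : Int)) (some ((j : Int) + 1))
    pvLoop pairs terminate n (j + 1) (travs ++ [seg.map Prod.fst]) (sides ++ [seg.map Prod.snd])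
  else (travs, sides)
termination_by n - start
decreasing_by
  have hj : start ≤ ((PySem.List.index? (terminate.drop start) true).map (start + ·)).getD (n - 1) := by
    cases hx : PySem.List.index? (terminate.drop start) true with
    | none => simp [hx]; omega
    | some k => simp [hx]
  omega

def split_traverse_alt (traverse : List Int) (side : List Int) (terminate : List Bool) : List (List Int) × List (List Int) :=
  let n := terminate.length
  let pairs := (PySem.List.pyRange 0 (n : Int) 1).map
    (fun i => (PySem.List.pyGetD traverse i 0, PySem.List.pyGetD side i 0))
  pvLoop pairs terminate n 0 [] []


-- ===== PRECONDITION & SPEC =====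
-- Pre_ excludes exactly the inputs where A raises IndexError: traverse or side shorter than terminate.
def Pre_split_traverse (traverse : List Int) (side : List Int) (terminate : List Bool) : Prop :=
  terminate.length ≤ traverse.length ∧ terminate.length ≤ side.length
instance (traverse : List Int) (side : List Int) (terminate : List Bool) : Decidable (Pre_split_traverse traverse side terminate) := by unfold Pre_split_traverse; infer_instance

def pvWitness_split_traverse : List Int × List Int × List Bool := ([1, 2, 3], [4, 5, 6], [false, true, false])

def Spec_split_traverse (traverse : List Int) (side : List Int) (terminate : List Bool) (out : List (List Int) × List (List Int)) : Prop := out = split_traverse_alt traverse side terminate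
instance (traverse : List Int) (side : List Int) (terminate : List Bool) (out : List (List Int) × List (List Int)) : Decidable (Spec_split_traverse traverse side terminate out) := by unfold Spec_split_traverse; infer_instance

-- ===== CLAIM (what is proved, stated in full; the proofs are below) =====
def Claim_equal_split_traverse : Prop := ∀ (traverse : List Int) (side : List Int) (terminate : List Bool), Dom_split_traverse traverse side terminate → Pre_split_traverse traverse side terminate → Spec_split_traverse traverse side terminate (split_traverse traverse side terminate)

-- ===== LEMMAS AND PROOFS =====

def pvSegments (ps : List (Int × Int)) (flags : List Bool) : List (List (Int × Int)) :=
  if h : flags = [] then []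
  else
    let j : Nat := if flags.contains true then (PySem.List.index? flags true).getD 0 else flags.length - 1
    PySem.List.slice ps none (some ((j : Int) + 1)) ::
      pvSegments (PySem.List.slice ps (some ((j : Int) + 1)) none)
                 (PySem.List.slice flags (some ((j : Int) + 1)) none)
termination_by flags.length
decreasing_by
  rw [PySem.List.slice_from flags (by omega)]
  have hlen : 0 < flags.length := List.length_pos_of_ne_nil h
  simp only [List.length_drop]
  omega


-- A's loop, restated as a structural recursion over the paired table and the flag list.
def pvScan : List (Int × Int) → List Bool → List Int → List Int → List (List Int) → List (List Int) → List (List Int) × List (List Int)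
  | (a, b) :: zr, term :: tmr, t, s, travs, sides =>
      if term || tmr.isEmpty then pvScan zr tmr [] [] (travs ++ [t ++ [a]]) (sides ++ [s ++ [b]])
      else pvScan zr tmr (t ++ [a]) (s ++ [b]) travs sides
  | _, _, _, _, travs, sides => (travs, sides)

theorem pvSegments_nil (ps : List (Int × Int)) : pvSegments ps [] = [] := by
  rw [pvSegments]; simp

theorem pvSegments_cons_true (ps : List (Int × Int)) (rest : List Bool) :
    pvSegments ps (true :: rest) = ps.take 1 :: pvSegments ps.tail rest := by
  rw [pvSegments]
  simp [PySem.List.slice_from_one,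
        PySem.List.slice_to ps (b := 1) (by omega)]

theorem pvSegments_singleton (ps : List (Int × Int)) (b : Bool) : pvSegments ps [b] = [ps.take 1] := by
  cases b
  · rw [pvSegments]
    simp [PySem.List.slice_from_one, PySem.List.slice_to ps (b := 1) (by omega), pvSegments]
  · rw [pvSegments_cons_true, pvSegments]
    simp

theorem pvSegments_cons_false (q : Int × Int) (ps' : List (Int × Int)) (rest : List Bool)
    (hr : rest ≠ []) (g : List (Int × Int)) (gs : List (List (Int × Int)))
    (hsegs : pvSegments ps' rest = g :: gs) :
    pvSegments (q :: ps') (false :: rest) = (q :: g) :: gs := by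
  have hrlen : 0 < rest.length := List.length_pos_of_ne_nil hr
  -- the index j computed for rest
  set jr : Nat := if rest.contains true then (PySem.List.index? rest true).getD 0 else rest.length - 1 with hjr
  have hjcons : (if (false :: rest).contains true then (PySem.List.index? (false :: rest) true).getD 0
      else (false :: rest).length - 1) = jr + 1 := by
    by_cases hc : rest.contains true
    · have hmem : true ∈ rest := by simpa using hc
      obtain ⟨k, hk⟩ := Option.isSome_iff_exists.mp ((PySem.List.index?_isSome_iff rest true).mpr hmem)
      rw [PySem.List.index?_cons_of_ne rest (by simp)]
      simp only [PySem.List.index?_eq_idxOf?] at hk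
      simp [hmem, hjr, hk]
    · have hnm : true ∉ rest := by simpa using hc
      simp [hnm, hjr, List.length_cons]
      omega
  rw [pvSegments]
  simp only [reduceCtorEq, dite_false]
  rw [hjcons]
  push_cast
  rw [pvSegments] at hsegs
  simp only [hr, reduceDIte, ← hjr] at hsegs
  rw [PySem.List.slice_to (q :: ps') (by omega),
      PySem.List.slice_from (q :: ps') (by omega),
      PySem.List.slice_from (false :: rest) (by omega)]
  rw [PySem.List.slice_to ps' (by omega), PySem.List.slice_from ps' (by omega),
      PySem.List.slice_from rest (by omega)] at hsegs
  have h1 : ((jr : Int) + 1 + 1).toNat = jr + 2 := by omega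
  have h2 : ((jr : Int) + 1).toNat = jr + 1 := by omega
  rw [h1]
  simp only [List.drop_succ_cons, List.take_succ_cons]
  rw [h2] at hsegs
  rw [List.cons_eq_cons] at hsegs
  obtain ⟨hg, hgs⟩ := hsegs
  rw [← hg, hgs]

theorem pvSegments_ne_nil (ps : List (Int × Int)) (flags : List Bool) (h : flags ≠ []) :
    pvSegments ps flags ≠ [] := by
  rw [pvSegments]; simp [h]

theorem pvScan_eq_segments : ∀ (tm : List Bool) (ps : List (Int × Int)), ps.length = tm.length →
    ∀ (t s : List Int) (travs sides : List (List Int)),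
    pvScan ps tm t s travs sides =
      match pvSegments ps tm with
      | [] => (travs, sides)
      | g :: gs => (travs ++ (t ++ g.map Prod.fst) :: gs.map (List.map Prod.fst),
                    sides ++ (s ++ g.map Prod.snd) :: gs.map (List.map Prod.snd)) := by
  intro tm
  induction tm with
  | nil =>
    intro ps h t s travs sides
    have : ps = [] := List.eq_nil_of_length_eq_zero h
    subst this
    simp [pvScan, pvSegments_nil]
  | cons term rest ih =>
    intro ps h t s travs sides
    cases ps with
    | nil => simp at h
    | cons q ps' =>
      obtain ⟨a, b⟩ := q
      by_cases hrest : rest = []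
      · subst hrest
        have hps' : ps' = [] := by simpa using h
        subst hps'
        rw [pvSegments_singleton]
        simp [pvScan]
      · have hlen' : ps'.length = rest.length := by simpa using h
        have hne := pvSegments_ne_nil ps' rest hrest
        obtain ⟨g, gs, hsegs⟩ : ∃ g gs, pvSegments ps' rest = g :: gs := by
          cases hx : pvSegments ps' rest with
          | nil => exact absurd hx hne
          | cons g gs => exact ⟨g, gs, rfl⟩
        cases term
        · rw [pvScan]
          simp only [Bool.false_or, List.isEmpty_iff, if_neg hrest]
          rw [ih ps' hlen' (t ++ [a]) (s ++ [b]) travs sides, hsegs,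
              pvSegments_cons_false (a, b) ps' rest hrest g gs hsegs]
          simp
        · rw [pvScan]
          simp only [Bool.true_or, if_pos]
          rw [ih ps' hlen' [] [] (travs ++ [t ++ [a]]) (sides ++ [s ++ [b]]), hsegs,
              pvSegments_cons_true]
          simp [hsegs]

theorem pvPairs_eq (tr sd : List Int) (N : Nat) (hTr : N ≤ tr.length) (hSd : N ≤ sd.length) :
    (PySem.List.pyRange 0 (N : Int) 1).map (fun i => (PySem.List.pyGetD tr i 0, PySem.List.pyGetD sd i 0))
      = (tr.take N).zip (sd.take N) := by
  rw [PySem.List.pyRange_one]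
  simp only [zero_add, Int.sub_zero, Int.toNat_natCast, List.map_map]
  apply List.ext_getElem
  · simp [List.length_zip]; omega
  · intro k hk1 hk2
    simp only [List.getElem_map, List.getElem_range, Function.comp_apply, List.getElem_zip,
      List.getElem_take]
    have hkN : k < N := by simpa using hk1
    rw [PySem.List.pyGetD_ofNat tr k 0 (by omega), PySem.List.pyGetD_ofNat sd k 0 (by omega)]

theorem pvFoldA (tr sd : List Int) (N : Nat) (hTr : N ≤ tr.length) (hSd : N ≤ sd.length) :
    ∀ (tml : List Bool) (i0 : Nat), i0 + tml.length = N →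
    ∀ (travs sides : List (List Int)) (t s : List Int),
    (let r := (PySem.List.enumerate tml (i0 : Int)).foldl
        (fun (st : List (List Int) × List (List Int) × List Int × List Int) (p : Int × Bool) =>
          let t := st.2.2.1 ++ [PySem.List.pyGetD tr p.1 0]
          let s := st.2.2.2 ++ [PySem.List.pyGetD sd p.1 0]
          if p.2 || decide (p.1 = (N : Int) - 1) then (st.1 ++ [t], st.2.1 ++ [s], ([] : List Int), ([] : List Int))
          else (st.1, st.2.1, t, s))
        (travs, sides, t, s)
     (r.1, r.2.1)) = pvScan (((tr.take N).zip (sd.take N)).drop i0) tml t s travs sides := by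
  intro tml
  induction tml with
  | nil =>
    intro i0 hi travs sides t s
    have h0 : i0 = N := by simpa using hi
    have hd : (((tr.take N).zip (sd.take N)).drop i0) = [] := by
      apply List.drop_eq_nil_of_le
      simp [List.length_zip]; omega
    rw [hd]
    simp [PySem.List.enumerate, pvScan]
  | cons term tml' ih =>
    intro i0 hi travs sides t s
    have hi0 : i0 < N := by simp at hi; omega
    have hzlen : ((tr.take N).zip (sd.take N)).length = N := by
      simp [List.length_zip]; omega
    have hdrop : (((tr.take N).zip (sd.take N)).drop i0)
        = ((tr.take N).zip (sd.take N))[i0] :: (((tr.take N).zip (sd.take N)).drop (i0 + 1)) :=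
      List.drop_eq_getElem_cons (by omega)
    have hget : ((tr.take N).zip (sd.take N))[i0]'(by omega) = (tr[i0]'(by omega), sd[i0]'(by omega)) := by
      simp [List.getElem_zip, List.getElem_take]
    rw [hdrop, hget]
    rw [PySem.List.enumerate_cons]
    simp only [List.foldl_cons]
    have hga : PySem.List.pyGetD tr (i0 : Int) 0 = tr[i0]'(by omega) := PySem.List.pyGetD_ofNat tr i0 0 (by omega)
    have hgb : PySem.List.pyGetD sd (i0 : Int) 0 = sd[i0]'(by omega) := PySem.List.pyGetD_ofNat sd i0 0 (by omega)
    have hcond : decide ((i0 : Int) = (N : Int) - 1) = tml'.isEmpty := by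
      cases tml' with
      | nil =>
        have h1 : i0 + 1 = N := by simpa using hi
        simp only [List.isEmpty_nil, decide_eq_true_eq]
        omega
      | cons x xs =>
        have h1 : i0 + (xs.length + 1) + 1 = N := by simpa using hi
        simp only [List.isEmpty_cons, decide_eq_false_iff_not]
        omega
    rw [pvScan]
    simp only [hga, hgb, hcond]
    have hcast : ((i0 : Int) + 1) = ((i0 + 1 : Nat) : Int) := by push_cast; ring
    by_cases hb : (term || tml'.isEmpty) = true
    · rw [if_pos hb]
      simp only [hb, if_true, hcast]
      exact ih (i0 + 1) (by simp at hi ⊢; omega) (travs ++ [t ++ [tr[i0]'(by omega)]]) (sides ++ [s ++ [sd[i0]'(by omega)]]) [] []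
    · rw [if_neg hb]
      simp only [hb, hcast]
      exact ih (i0 + 1) (by simp at hi ⊢; omega) travs sides (t ++ [tr[i0]'(by omega)]) (s ++ [sd[i0]'(by omega)])

theorem pvLoop_eq (pairs : List (Int × Int)) (tm : List Bool) (n : Nat)
    (hn : n = tm.length) (hp : pairs.length = n) :
    ∀ (k start : Nat), n - start ≤ k → ∀ (travs sides : List (List Int)),
    pvLoop pairs tm n start travs sides =
      (travs ++ (pvSegments (pairs.drop start) (tm.drop start)).map (List.map Prod.fst),
       sides ++ (pvSegments (pairs.drop start) (tm.drop start)).map (List.map Prod.snd)) := by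
  intro k
  induction k with
  | zero =>
    intro start hk travs sides
    have hs : ¬ start < n := by omega
    have h1 : tm.drop start = [] := List.drop_eq_nil_of_le (by omega)
    have h2 : pairs.drop start = [] := List.drop_eq_nil_of_le (by omega)
    rw [pvLoop, dif_neg hs, h1, h2, pvSegments]
    simp
  | succ k ih =>
    intro start hk travs sides
    by_cases hs : start < n
    · have hflags : tm.drop start ≠ [] := by
        intro hcon
        have := congrArg List.length hcon
        simp at this
        omega
      -- the relative index inside the dropped suffix
      have hrel : ∃ j' : Nat,
          (if (tm.drop start).contains true then (PySem.List.index? (tm.drop start) true).getD 0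
            else (tm.drop start).length - 1) = j'
          ∧ ((PySem.List.index? (tm.drop start) true).map (start + ·)).getD (n - 1) = start + j'
          ∧ j' < n - start := by
        cases hx : PySem.List.index? (tm.drop start) true with
        | none =>
          have hnm : true ∉ tm.drop start := (PySem.List.index?_eq_none_iff _ _).mp hx
          have hlen : (tm.drop start).length = n - start := by simp [hn]
          have hpos : 0 < (tm.drop start).length := List.length_pos_of_ne_nil hflags
          refine ⟨(tm.drop start).length - 1, by simp [hnm], ?_, by omega⟩
          simp [hx]
          omega
        | some j'' =>
          have hmem : true ∈ tm.drop start := (PySem.List.index?_isSome_iff _ _).mp (by rw [hx]; rfl)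
          have hx' : List.idxOf? true (tm.drop start) = some j'' := by
            rw [← PySem.List.index?_eq_idxOf?, hx]
          have hlen : (tm.drop start).length = n - start := by simp [hn]
          obtain ⟨hlt, -, -⟩ := PySem.List.getElem_of_index?_eq_some hx
          exact ⟨j'', by simp [hmem, hx'], by simp [hx], by omega⟩
      obtain ⟨j', hj'seg, hj'loop, hj'lt⟩ := hrel
      rw [pvLoop, dif_pos hs]
      simp only [hj'loop]
      rw [pvSegments, dif_neg hflags]
      simp only [hj'seg]
      -- identify the two slices
      have hslice : PySem.List.slice pairs (some (start : Int)) (some ((start + j' : Nat) + 1 : Int))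
          = PySem.List.slice (pairs.drop start) none (some ((j' : Nat) + 1 : Int)) := by
        rw [PySem.List.slice_toNat pairs (by omega) (by omega),
            PySem.List.slice_to (pairs.drop start) (by omega)]
        congr 1
        omega
      have hdp : PySem.List.slice (pairs.drop start) (some ((j' : Nat) + 1 : Int)) none
          = pairs.drop (start + j' + 1) := by
        rw [PySem.List.slice_from (pairs.drop start) (by omega)]
        rw [List.drop_drop]
        congr 1
      have hdt : PySem.List.slice (tm.drop start) (some ((j' : Nat) + 1 : Int)) none
          = tm.drop (start + j' + 1) := by
        rw [PySem.List.slice_from (tm.drop start) (by omega)]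
        rw [List.drop_drop]
        congr 1
      have hrec := ih (start + j' + 1) (by omega)
        (travs ++ [(PySem.List.slice pairs (some (start : Int)) (some ((start + j' : Nat) + 1 : Int))).map Prod.fst])
        (sides ++ [(PySem.List.slice pairs (some (start : Int)) (some ((start + j' : Nat) + 1 : Int))).map Prod.snd])
      push_cast at hrec hslice ⊢
      rw [hrec, hslice, hdp, hdt]
      simp
    · have h1 : tm.drop start = [] := List.drop_eq_nil_of_le (by omega)
      have h2 : pairs.drop start = [] := List.drop_eq_nil_of_le (by omega)
      rw [pvLoop, dif_neg hs, h1, h2, pvSegments]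
      simp

-- ===== VERDICT (by name: the statement is the Claim_ definition above) =====
theorem split_traverse_spec : Claim_equal_split_traverse := by
  intro tr sd tm _ hpre
  obtain ⟨hTr, hSd⟩ := hpre
  unfold Spec_split_traverse split_traverse split_traverse_alt
  dsimp only
  rw [pvPairs_eq tr sd tm.length hTr hSd]
  have hA := pvFoldA tr sd tm.length hTr hSd tm 0 (by omega) [] [] [] []
  simp only [Nat.cast_zero, List.drop_zero] at hA
  rw [hA]
  have hlen : ((tr.take tm.length).zip (sd.take tm.length)).length = tm.length := by
    simp [List.length_zip]; omega
  rw [pvScan_eq_segments tm _ hlen]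
  have hB := pvLoop_eq ((tr.take tm.length).zip (sd.take tm.length)) tm tm.length rfl hlen tm.length 0 (by omega) [] []
  simp only [List.drop_zero] at hB
  rw [hB]
  cases hsegs : pvSegments ((tr.take tm.length).zip (sd.take tm.length)) tm with
  | nil => simp [hsegs]
  | cons g gs => simp [hsegs]
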